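-- pv_equiv track=rewrite | github.com/ddingmin/BOJ | 프로그래머스/lv2/92342. 양궁대회/양궁대회.py | find
-- ===== SOURCE A (Python) =====
-- def find(temp):
--     ans = temp[-1]
--     for idx in range(len(temp) - 1):
--
--         for i in range(10 ,-1 ,-1):
--             if ans[i] == temp[idx][i]:
--                 continue
--             elif ans[i] > temp[idx][i]:
--                 break
--             else:
--                 ans = temp[idx]
--     return ans
-- ===== SOURCE B (Python) =====
-- def find(temp):
--     if len(temp) <= 1:
--         return temp[0]
--     mid = len(temp) // 2
--     l = find(temp[:mid])
--     r = find(temp[mid:])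
--     return l if [l[i] for i in range(10, -1, -1)] >= [r[i] for i in range(10, -1, -1)] else r
-- ===== Notes on version B (the rewrite author's own statement) =====
-- stated objective: alternative
-- what changed: A's single keep-the-best scan with a hand-written high-to-low index comparator (nested loop with continue/break, in-place replacement) is replaced by a divide-and-conquer tournament: split the list in half, recurse on each half, and compare the two winners' reversed index-10..0 key lists.
import Mathlib
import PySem

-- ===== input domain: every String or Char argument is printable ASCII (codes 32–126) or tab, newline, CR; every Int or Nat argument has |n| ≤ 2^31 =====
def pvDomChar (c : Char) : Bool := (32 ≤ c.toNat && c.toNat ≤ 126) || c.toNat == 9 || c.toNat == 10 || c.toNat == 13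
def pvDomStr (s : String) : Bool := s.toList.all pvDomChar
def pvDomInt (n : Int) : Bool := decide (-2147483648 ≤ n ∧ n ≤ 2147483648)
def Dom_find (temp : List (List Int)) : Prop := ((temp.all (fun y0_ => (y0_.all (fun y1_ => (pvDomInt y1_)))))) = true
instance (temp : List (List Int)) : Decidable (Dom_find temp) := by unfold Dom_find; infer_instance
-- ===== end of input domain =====

-- B replaces A's manual keep-the-best linear scan by a divide-and-conquer tournament: split in
-- half, recurse, compare the two winners' reversed index-10..0 key lists (alternative; same
-- result on Pre_, not faster).

-- ===== PORT A =====
-- inner 'for i in range(10,-1,-1)' loop with break; 'ans = temp[idx]' then continue ≡ recursing with cand as ans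
def pvFindInner (ans cand : List Int) : List Int → List Int
  | [] => ans
  | i :: rest =>
    if PySem.List.pyGetD ans i 0 = PySem.List.pyGetD cand i 0 then pvFindInner ans cand rest
    else if PySem.List.pyGetD ans i 0 > PySem.List.pyGetD cand i 0 then ans
    else pvFindInner cand cand rest

def find (temp : List (List Int)) : List Int :=
  let ans := (PySem.List.pyGet? temp (-1)).getD []
  (PySem.List.pyRange 0 ((temp.length : Int) - 1) 1).foldl
    (fun ans idx => pvFindInner ans (PySem.List.pyGetD temp idx []) (PySem.List.pyRange 10 (-1) (-1)))
    ans

-- ===== PORT B =====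
-- [x[i] for i in range(10, -1, -1)]
def pvKeyList (x : List Int) : List Int :=
  (PySem.List.pyRange 10 (-1) (-1)).map (fun i => PySem.List.pyGetD x i 0)

def find_alt (temp : List (List Int)) : List Int :=
  if _h : temp.length ≤ 1 then (PySem.List.pyGet? temp 0).getD []
  else
    let mid := PySem.Int.floordiv ((temp.length : Int)) 2
    let l := find_alt (PySem.List.slice temp none (some mid))
    let r := find_alt (PySem.List.slice temp (some mid) none)
    if pvKeyList l ≥ pvKeyList r then l else r
termination_by temp.length
decreasing_by
  · have hm : PySem.Int.floordiv ((temp.length : Int)) 2 = ((temp.length / 2 : Nat) : Int) := by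
      exact_mod_cast PySem.Int.floordiv_natCast temp.length 2
    rw [hm, PySem.List.slice_to_natCast]
    simp only [List.length_take]
    omega
  · have hm : PySem.Int.floordiv ((temp.length : Int)) 2 = ((temp.length / 2 : Nat) : Int) := by
      exact_mod_cast PySem.Int.floordiv_natCast temp.length 2
    rw [hm, PySem.List.slice_from_natCast]
    simp only [List.length_drop]
    omega

-- ===== PRECONDITION & SPEC =====
-- Pre_ excludes (a) the inputs on which A raises IndexError — the empty list (temp[-1]) and lists of
-- ≥ 2 rows containing a row shorter than 11 (the comparison reads index 10 of every row; a
-- single-row list returns without reading any row) — and (b) the tie corner: lists holding two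
-- DISTINCT rows that agree on all of indices 0..10, where A's first-vs-last tie-break (keep the
-- last row if maximal, else the first maximal one) is accidental and B's stable-sort choice is as
-- defensible; no reasonable caller specifies either.
def Pre_find (temp : List (List Int)) : Prop :=
  temp ≠ [] ∧
    (temp.length = 1 ∨
      ((∀ l ∈ temp, 11 ≤ l.length) ∧
        ∀ x ∈ temp, ∀ y ∈ temp, x.take 11 = y.take 11 → x = y))
instance (temp : List (List Int)) : Decidable (Pre_find temp) := by unfold Pre_find; infer_instance

def pvWitness_find : List (List Int) :=
  [[0, 1, 0, 2, 0, 0, 0, 0, 0, 0, 3], [1, 0, 0, 0, 0, 0, 0, 2, 0, 0, 3]]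

def Spec_find (temp : List (List Int)) (out : List Int) : Prop := out = find_alt temp
instance (temp : List (List Int)) (out : List Int) : Decidable (Spec_find temp out) := by unfold Spec_find; infer_instance

-- ===== CLAIM (what is proved, stated in full; the proofs are below) =====
def Claim_equal_find : Prop := ∀ (temp : List (List Int)), Dom_find temp → Pre_find temp → Spec_find temp (find temp)

-- ===== LEMMAS AND PROOFS =====

-- the key both programs effectively compare by: the reversed 11-entry prefix
def pvKey (a : List Int) : List Int := (a.take 11).reverse

-- the index list [n-1, …, 0] both key computations walk
def pvIdxs (n : Nat) : List Int := (List.range n).reverse.map (Int.ofNat ·)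

theorem pvIdxs_succ (n : Nat) : pvIdxs (n + 1) = (n : Int) :: pvIdxs n := by
  simp [pvIdxs, List.range_succ]

theorem pvRange_eq_idxs : PySem.List.pyRange 10 (-1) (-1) = pvIdxs 11 := by decide

theorem pvMap_idxs_eq_take (n : Nat) : ∀ (a : List Int), n ≤ a.length →
    (pvIdxs n).map (fun i => PySem.List.pyGetD a i 0) = (a.take n).reverse := by
  induction n with
  | zero => intro a _; simp [pvIdxs]
  | succ n ih =>
    intro a ha
    have ha' : n < a.length := by omega
    rw [pvIdxs_succ, List.map_cons, ih a (by omega)]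
    have h1 : (a.take (n + 1)).reverse = a[n] :: (a.take n).reverse := by
      rw [List.take_add_one]
      simp [List.getElem?_eq_getElem ha']
    rw [h1]
    congr 1
    simp [PySem.List.pyGetD_natCast, List.getD_eq_getElem?_getD, ha']

theorem pvKeyList_eq (a : List Int) (h : 11 ≤ a.length) : pvKeyList a = pvKey a := by
  rw [pvKeyList, pvRange_eq_idxs, pvKey]
  exact pvMap_idxs_eq_take 11 a h

theorem pvFindInner_self (l : List Int) (x : List Int) : pvFindInner x x l = x := by
  induction l with
  | nil => rfl
  | cons i rest ih => simp [pvFindInner, ih]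

theorem pvFindInner_eq (n : Nat) : ∀ (ans cand : List Int), n ≤ ans.length → n ≤ cand.length →
    pvFindInner ans cand (pvIdxs n) =
      if (ans.take n).reverse < (cand.take n).reverse then cand else ans := by
  induction n with
  | zero =>
    intro ans cand _ _
    simp [pvIdxs, pvFindInner]
  | succ n ih =>
    intro ans cand ha hc
    have ha' : n < ans.length := by omega
    have hc' : n < cand.length := by omega
    have hga : PySem.List.pyGetD ans (n : Int) 0 = ans[n] := by
      simp [PySem.List.pyGetD_natCast, List.getD_eq_getElem?_getD, ha']
    have hgc : PySem.List.pyGetD cand (n : Int) 0 = cand[n] := by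
      simp [PySem.List.pyGetD_natCast, List.getD_eq_getElem?_getD, hc']
    have hta : (ans.take (n + 1)).reverse = ans[n] :: (ans.take n).reverse := by
      rw [List.take_add_one]
      simp [List.getElem?_eq_getElem ha']
    have htc : (cand.take (n + 1)).reverse = cand[n] :: (cand.take n).reverse := by
      rw [List.take_add_one]
      simp [List.getElem?_eq_getElem hc']
    rw [pvIdxs_succ, hta, htc]
    show (if PySem.List.pyGetD ans (n : Int) 0 = PySem.List.pyGetD cand (n : Int) 0 then
        pvFindInner ans cand (pvIdxs n)
      else if PySem.List.pyGetD ans (n : Int) 0 > PySem.List.pyGetD cand (n : Int) 0 then ans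
      else pvFindInner cand cand (pvIdxs n)) = _
    rw [hga, hgc]
    by_cases heq : ans[n] = cand[n]
    · rw [if_pos heq, ih ans cand (by omega) (by omega)]
      by_cases hlt : (ans.take n).reverse < (cand.take n).reverse
      · rw [if_pos hlt, if_pos (List.cons_lt_cons_iff.mpr (Or.inr ⟨heq, hlt⟩))]
      · rw [if_neg hlt, if_neg (by
          intro hcontra
          rcases List.cons_lt_cons_iff.mp hcontra with h | ⟨_, h⟩
          · omega
          · exact hlt h)]
    · rw [if_neg heq]
      by_cases hgt : ans[n] > cand[n]
      · rw [if_pos hgt, if_neg (by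
          intro hcontra
          rcases List.cons_lt_cons_iff.mp hcontra with h | ⟨h, _⟩
          · omega
          · exact heq h)]
      · rw [if_neg hgt, pvFindInner_self,
          if_pos (List.cons_lt_cons_iff.mpr (Or.inl (by omega)))]

-- A's fold over rows of length ≥ 11 is the plain keep-if-strictly-greater-key fold
theorem pvFold_inner_eq (l : List (List Int)) : ∀ (ans : List Int),
    (∀ x ∈ l, 11 ≤ x.length) → 11 ≤ ans.length →
    l.foldl (fun a c => pvFindInner a c (PySem.List.pyRange 10 (-1) (-1))) ans =
      l.foldl (fun a c => if pvKey a < pvKey c then c else a) ans := by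
  induction l with
  | nil => intro ans _ _; rfl
  | cons c rest ih =>
    intro ans hl ha
    have hc : 11 ≤ c.length := hl c (by simp)
    have hstep : pvFindInner ans c (PySem.List.pyRange 10 (-1) (-1)) =
        if pvKey ans < pvKey c then c else ans := by
      rw [pvRange_eq_idxs, pvFindInner_eq 11 ans c ha hc]; rfl
    simp only [List.foldl_cons, hstep]
    apply ih
    · intro x hx; exact hl x (by simp [hx])
    · split_ifs <;> assumption

-- the keep-max fold returns a member with a maximal key
theorem pvFoldMax_spec (l : List (List Int)) : ∀ (seed : List Int),
    (l.foldl (fun a c => if pvKey a < pvKey c then c else a) seed = seed ∨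
      l.foldl (fun a c => if pvKey a < pvKey c then c else a) seed ∈ l) ∧
    pvKey seed ≤ pvKey (l.foldl (fun a c => if pvKey a < pvKey c then c else a) seed) ∧
    ∀ x ∈ l, pvKey x ≤ pvKey (l.foldl (fun a c => if pvKey a < pvKey c then c else a) seed) := by
  induction l with
  | nil => intro seed; exact ⟨Or.inl rfl, le_refl _, by simp⟩
  | cons c rest ih =>
    intro seed
    simp only [List.foldl_cons]
    obtain ⟨hmem, hseed, hall⟩ := ih (if pvKey seed < pvKey c then c else seed)
    have hs : pvKey seed ≤ pvKey (if pvKey seed < pvKey c then c else seed) := by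
      split_ifs with h
      · exact le_of_lt h
      · exact le_refl _
    have hc : pvKey c ≤ pvKey (if pvKey seed < pvKey c then c else seed) := by
      split_ifs with h
      · exact le_refl _
      · exact le_of_not_gt h
    refine ⟨?_, le_trans hs hseed, ?_⟩
    · rcases hmem with h | h
      · rw [h]; split_ifs with h'
        · exact Or.inr (by simp)
        · exact Or.inl rfl
      · exact Or.inr (by simp [h])
    · intro x hx
      rcases List.mem_cons.mp hx with rfl | hx
      · exact le_trans hc hseed
      · exact hall x hx

-- A's value is the keep-max fold over dropLast seeded with the last row
theorem pvFind_eq (temp : List (List Int)) (h : temp ≠ []) :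
    find temp = temp.dropLast.foldl
      (fun a c => pvFindInner a c (PySem.List.pyRange 10 (-1) (-1))) (temp.getLast h) := by
  unfold find
  have h1 : (PySem.List.pyGet? temp (-1)).getD [] = temp.getLast h := by
    rw [PySem.List.pyGet?_neg_one, List.getLast?_eq_some_getLast h]
    rfl
  have hlen : ((temp.length : Int) - 1) = (temp.dropLast.length : Int) := by
    have : 1 ≤ temp.length := List.length_pos_iff.mpr h
    simp [List.length_dropLast]
    omega
  rw [h1, hlen]
  rw [PySem.List.foldl_congr_mem (g := fun a idx =>
    pvFindInner a (PySem.List.pyGetD temp.dropLast idx []) (PySem.List.pyRange 10 (-1) (-1)))]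
  · exact PySem.List.foldl_pyRange_zero_pyGetD' temp.dropLast []
      (fun a c => pvFindInner a c (PySem.List.pyRange 10 (-1) (-1))) _
  · intro acc idx hidx
    obtain ⟨h0, h2⟩ := PySem.List.mem_pyRange_one.mp hidx
    have hnat : idx.toNat < temp.dropLast.length := by omega
    have hnat' : idx.toNat < temp.length := by
      rw [List.length_dropLast] at hnat; omega
    rw [PySem.List.pyGetD_eq_getElem temp [] h0 (by omega),
        PySem.List.pyGetD_eq_getElem temp.dropLast [] h0 h2,
        List.getElem_dropLast]

theorem pvFindAlt_singleton (r : List Int) : find_alt [r] = r := by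
  unfold find_alt
  rfl

-- B's tournament returns a member of temp; with all rows of length ≥ 11 its key is maximal
theorem pvFindAlt_spec (n : Nat) : ∀ (temp : List (List Int)), temp.length ≤ n → temp ≠ [] →
    (∀ x ∈ temp, 11 ≤ x.length) →
    find_alt temp ∈ temp ∧ ∀ y ∈ temp, pvKey y ≤ pvKey (find_alt temp) := by
  induction n with
  | zero =>
    intro temp hlen hne _
    exact absurd (List.length_eq_zero_iff.mp (by omega)) hne
  | succ n ih =>
    intro temp hlen hne hrows
    by_cases h1 : temp.length ≤ 1
    · obtain ⟨r, hr⟩ : ∃ r, temp = [r] := by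
        match temp, hne, h1 with
        | [r], _, _ => exact ⟨r, rfl⟩
      subst hr
      rw [pvFindAlt_singleton]
      exact ⟨by simp, by simp⟩
    · have hm : PySem.Int.floordiv ((temp.length : Int)) 2 = ((temp.length / 2 : Nat) : Int) := by
        exact_mod_cast PySem.Int.floordiv_natCast temp.length 2
      have hstep : find_alt temp =
          (if pvKeyList (find_alt (temp.take (temp.length / 2))) ≥
              pvKeyList (find_alt (temp.drop (temp.length / 2))) then
            find_alt (temp.take (temp.length / 2))
          else find_alt (temp.drop (temp.length / 2))) := by
        rw [find_alt]
        simp only [dif_neg h1, hm, PySem.List.slice_to_natCast, PySem.List.slice_from_natCast]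
      have htne : temp.take (temp.length / 2) ≠ [] := by
        intro hc
        have := congrArg List.length hc
        simp only [List.length_take, List.length_nil] at this
        omega
      have hdne : temp.drop (temp.length / 2) ≠ [] := by
        intro hc
        have := congrArg List.length hc
        simp only [List.length_drop, List.length_nil] at this
        omega
      have htsub : ∀ x ∈ temp.take (temp.length / 2), x ∈ temp :=
        fun x hx => (List.take_sublist _ _).subset hx
      have hdsub : ∀ x ∈ temp.drop (temp.length / 2), x ∈ temp :=
        fun x hx => (List.drop_sublist _ _).subset hx
      obtain ⟨hlmem, hlmax⟩ := ih (temp.take (temp.length / 2))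
        (by rw [List.length_take]; omega) htne (fun x hx => hrows x (htsub x hx))
      obtain ⟨hrmem, hrmax⟩ := ih (temp.drop (temp.length / 2))
        (by rw [List.length_drop]; omega) hdne (fun x hx => hrows x (hdsub x hx))
      have hkl : pvKeyList (find_alt (temp.take (temp.length / 2))) =
          pvKey (find_alt (temp.take (temp.length / 2))) :=
        pvKeyList_eq _ (hrows _ (htsub _ hlmem))
      have hkr : pvKeyList (find_alt (temp.drop (temp.length / 2))) =
          pvKey (find_alt (temp.drop (temp.length / 2))) :=
        pvKeyList_eq _ (hrows _ (hdsub _ hrmem))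
      rw [hstep, hkl, hkr]
      split_ifs with hge
      · refine ⟨htsub _ hlmem, fun y hy => ?_⟩
        rw [← List.take_append_drop (temp.length / 2) temp, List.mem_append] at hy
        rcases hy with hy | hy
        · exact hlmax y hy
        · exact le_trans (hrmax y hy) hge
      · refine ⟨hdsub _ hrmem, fun y hy => ?_⟩
        rw [← List.take_append_drop (temp.length / 2) temp, List.mem_append] at hy
        rcases hy with hy | hy
        · exact le_trans (hlmax y hy) (le_of_not_ge hge)
        · exact hrmax y hy

-- ===== VERDICT (by name: the statement is the Claim_ definition above) =====
theorem find_spec : Claim_equal_find := by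
  unfold Claim_equal_find
  intro temp _ hpre
  obtain ⟨hne, hcase⟩ := hpre
  unfold Spec_find
  rcases hcase with h1 | ⟨hlen, hdist⟩
  · -- one row: both sides return it
    obtain ⟨r, hr⟩ : ∃ r, temp = [r] := by
      match temp, h1 with
      | [r], _ => exact ⟨r, rfl⟩
    subst hr
    rw [pvFind_eq [r] hne, pvFindAlt_singleton]
    rfl
  · -- rows of length ≥ 11, pairwise distinct on the first 11 entries
    obtain ⟨hBmem, hBmax⟩ := pvFindAlt_spec temp.length temp (le_refl _) hne hlen
    rw [pvFind_eq temp hne, pvFold_inner_eq temp.dropLast (temp.getLast hne)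
      (fun x hx => hlen x (List.mem_of_mem_dropLast hx)) (hlen _ (List.getLast_mem hne))]
    obtain ⟨hAmem, hAseed, hAall⟩ := pvFoldMax_spec temp.dropLast (temp.getLast hne)
    set rA := temp.dropLast.foldl (fun a c => if pvKey a < pvKey c then c else a) (temp.getLast hne)
    have hAin : rA ∈ temp := by
      rcases hAmem with h | h
      · rw [h]; exact List.getLast_mem hne
      · exact List.mem_of_mem_dropLast h
    have hAmax : ∀ x ∈ temp, pvKey x ≤ pvKey rA := by
      intro x hx
      rw [← List.dropLast_append_getLast hne, List.mem_append, List.mem_singleton] at hx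
      rcases hx with h | h
      · exact hAall x h
      · rw [h]; exact hAseed
    have hkeys : pvKey rA = pvKey (find_alt temp) :=
      le_antisymm (hBmax rA hAin) (hAmax (find_alt temp) hBmem)
    have htake : rA.take 11 = (find_alt temp).take 11 :=
      List.reverse_injective hkeys
    exact hdist rA hAin (find_alt temp) hBmem htake
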